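-- pv_equiv track=rewrite | github.com/benediktveith/xai-rag | src/modules/explainers/kgrag_ex_explainer.py | _parse_subpath_removed
-- ===== SOURCE A (Python) =====
-- from typing import List, Optional, Dict, Tuple
--
-- def _parse_subpath_removed(removed: str) -> Optional[tuple[str, str, str]]:
--     s = (removed or "").strip()
--     if not (s.startswith("(") and s.endswith(")")):
--         return None
--     inner = s[1:-1]
--     parts = [p.strip() for p in inner.split(",")]
--     if len(parts) != 3:
--         return None
--     return parts[0], parts[1], parts[2]
-- ===== SOURCE B (Python) =====
-- def _parse_subpath_removed(removed):
--     s = (removed or "").strip()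
--     if len(s) < 2 or s[0] != "(" or s[-1] != ")":
--         return None
--     bufs = ["", "", ""]
--     k = 0
--     for ch in s[1:-1]:
--         if ch == ",":
--             k += 1
--             if k > 2:
--                 return None
--         else:
--             bufs[k] += ch
--     if k != 2:
--         return None
--     return bufs[0].strip(), bufs[1].strip(), bufs[2].strip()
-- ===== Notes on version B (the rewrite author's own statement) =====
-- stated objective: alternative
-- what changed: B replaces A's staged pipeline (strip brackets, split(",") into a list, length-3 check, per-part strip) by a single left-to-right pass over the inner characters with an accumulator state machine (a comma counter and three field buffers, rejecting early on a third comma), stripping each buffer at the end; e.g. both map " ( a, b ,c ) " to ('a', 'b', 'c') and "(a,b)" to None.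
import Mathlib
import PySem

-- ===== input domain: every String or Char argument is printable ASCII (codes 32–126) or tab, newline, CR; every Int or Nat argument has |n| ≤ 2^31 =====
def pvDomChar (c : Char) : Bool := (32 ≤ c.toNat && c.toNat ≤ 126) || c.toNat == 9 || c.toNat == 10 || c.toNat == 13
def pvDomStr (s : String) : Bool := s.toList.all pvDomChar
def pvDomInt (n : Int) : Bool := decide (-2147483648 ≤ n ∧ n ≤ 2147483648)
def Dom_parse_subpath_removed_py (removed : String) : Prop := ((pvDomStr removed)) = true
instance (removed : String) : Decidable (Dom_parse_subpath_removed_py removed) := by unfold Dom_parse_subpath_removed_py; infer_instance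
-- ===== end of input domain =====

-- B replaces A's split-into-a-list-of-parts pipeline by a single accumulator pass over the
-- inner characters (comma counter + three field buffers, early reject on a third comma).

-- ===== PORT A =====
-- 'if len(parts) != 3: return None / return parts[0], parts[1], parts[2]' as a helper match
def pyParts3 (parts : List String) : Option (String × String × String) :=
  match parts with
  | [a, b, c] => some (a, b, c)
  | _ => none

def parse_subpath_removed_py (removed : String) : Option (String × String × String) :=
  let s := PySem.Str.strip (if removed = "" then "" else removed)
  if !(PySem.Str.startswith s "(" && PySem.Str.endswith s ")") then none
  else
    let inner := PySem.Str.slice s (some 1) (some (-1))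
    pyParts3 (((PySem.Str.split? inner ",").getD []).map PySem.Str.strip)

-- ===== PORT B =====
-- the for-loop of Source B: state = (comma count k, the three buffers); early return None on a 3rd comma
def goB : List Char → Nat → List Char → List Char → List Char → Option (List Char × List Char × List Char)
  | [], k, b0, b1, b2 => if k = 2 then some (b0, b1, b2) else none
  | c :: rest, k, b0, b1, b2 =>
    if c = ',' then
      if k + 1 > 2 then none else goB rest (k + 1) b0 b1 b2
    else
      match k with
      | 0 => goB rest 0 (b0 ++ [c]) b1 b2
      | 1 => goB rest 1 b0 (b1 ++ [c]) b2
      | _ => goB rest k b0 b1 (b2 ++ [c])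

def parse_subpath_removed_py_alt (removed : String) : Option (String × String × String) :=
  let s := PySem.Str.strip (if removed = "" then "" else removed)
  let cs := s.toList
  if cs.length < 2 ∨ PySem.List.pyGet? cs 0 ≠ some '(' ∨ PySem.List.pyGet? cs (-1) ≠ some ')' then
    none
  else
    match goB (PySem.List.slice cs (some 1) (some (-1))) 0 [] [] [] with
    | some (x, y, z) =>
        some (String.ofList (PySem.Chars.strip x),
              String.ofList (PySem.Chars.strip y),
              String.ofList (PySem.Chars.strip z))
    | none => none

-- ===== PRECONDITION & SPEC =====
def Spec_parse_subpath_removed_py (removed : String) (out : Option (String × String × String)) : Prop := out = parse_subpath_removed_py_alt removed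
instance (removed : String) (out : Option (String × String × String)) : Decidable (Spec_parse_subpath_removed_py removed out) := by unfold Spec_parse_subpath_removed_py; infer_instance

-- ===== CLAIM (what is proved, stated in full; the proofs are below) =====
def Claim_equal_parse_subpath_removed_py : Prop := ∀ (removed : String), Dom_parse_subpath_removed_py removed → Spec_parse_subpath_removed_py removed (parse_subpath_removed_py removed)

-- ===== LEMMAS AND PROOFS =====

-- prepend onto the head of a (nonempty) list of parts
def prepHead (x : List Char) : List (List Char) → List (List Char)
  | [] => [x]
  | h :: t => (x ++ h) :: t

-- structural single-separator split
def mySplit (c : Char) : List Char → List (List Char)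
  | [] => [[]]
  | x :: xs => if x = c then [] :: mySplit c xs else prepHead [x] (mySplit c xs)

lemma prepHead_ne_nil (x : List Char) (l : List (List Char)) : prepHead x l ≠ [] := by
  cases l <;> simp [prepHead]

lemma mySplit_ne_nil (c : Char) (cs : List Char) : mySplit c cs ≠ [] := by
  cases cs with
  | nil => simp [mySplit]
  | cons x xs =>
    simp only [mySplit]
    split
    · simp
    · exact prepHead_ne_nil _ _

lemma prepHead_nil (l : List (List Char)) (h : l ≠ []) : prepHead [] l = l := by
  cases l with
  | nil => exact absurd rfl h
  | cons a t => simp [prepHead]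

lemma prepHead_prepHead (a b : List Char) (l : List (List Char)) :
    prepHead a (prepHead b l) = prepHead (a ++ b) l := by
  cases l <;> simp [prepHead]

lemma splitOn_go_single (c : Char) :
    ∀ (fuel : Nat) (l cur : List Char) (acc : List (List Char)), l.length ≤ fuel →
      PySem.Chars.splitOn.go [c] fuel l cur acc = acc.reverse ++ prepHead cur.reverse (mySplit c l) := by
  intro fuel
  induction fuel with
  | zero =>
    intro l cur acc h
    have hl : l = [] := by cases l <;> simp_all
    subst hl
    rw [PySem.Chars.splitOn.go.eq_def]
    simp [mySplit, prepHead]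
  | succ fuel ih =>
    intro l cur acc h
    cases l with
    | nil =>
      rw [PySem.Chars.splitOn.go.eq_def]
      simp [mySplit, prepHead]
    | cons x rest =>
      rw [PySem.Chars.splitOn.go.eq_def]
      simp only [List.isPrefixOf, Bool.and_true]
      by_cases hx : c = x
      · subst hx
        simp only [beq_self_eq_true, if_pos, List.length_cons, List.length_nil,
          List.drop_succ_cons, List.drop_zero]
        rw [ih rest [] (cur.reverse :: acc) (by simp at h; omega)]
        rw [List.reverse_nil, prepHead_nil _ (mySplit_ne_nil c rest)]
        simp [mySplit, prepHead]
      · have hbx : (c == x) = false := by simp [hx]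
        simp only [hbx, Bool.false_eq_true, if_neg, not_false_iff]
        rw [ih rest (x :: cur) acc (by simpa using Nat.lt_succ_iff.mp (by simpa using h))]
        have : mySplit c (x :: rest) = prepHead [x] (mySplit c rest) := by
          simp [mySplit, Ne.symm hx]
        rw [this, prepHead_prepHead]
        simp [prepHead]

lemma splitOn_single (c : Char) (cs : List Char) :
    PySem.Chars.splitOn cs [c] = mySplit c cs := by
  unfold PySem.Chars.splitOn
  rw [splitOn_go_single c (cs.length + 1) cs [] [] (by omega)]
  simp [prepHead_nil _ (mySplit_ne_nil c cs)]

-- B's accumulator pass, characterised by the split of the remaining input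
lemma goB_spec (cs : List Char) : ∀ (b0 b1 b2 : List Char),
    goB cs 0 b0 b1 b2 = (match mySplit ',' cs with
      | [x, y, z] => some (b0 ++ x, b1 ++ y, b2 ++ z) | _ => none)
  ∧ goB cs 1 b0 b1 b2 = (match mySplit ',' cs with
      | [y, z] => some (b0, b1 ++ y, b2 ++ z) | _ => none)
  ∧ goB cs 2 b0 b1 b2 = (match mySplit ',' cs with
      | [z] => some (b0, b1, b2 ++ z) | _ => none) := by
  induction cs with
  | nil => intro b0 b1 b2; refine ⟨?_, ?_, ?_⟩ <;> simp [goB, mySplit]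
  | cons c rest ih =>
    intro b0 b1 b2
    by_cases hc : c = ','
    · subst hc
      have h0 := (ih b0 b1 b2).1
      have h1 := (ih b0 b1 b2).2.1
      have h2 := (ih b0 b1 b2).2.2
      refine ⟨?_, ?_, ?_⟩ <;>
        simp only [goB, mySplit, if_true] <;>
        rcases hms : mySplit ',' rest with _ | ⟨x, _ | ⟨y, _ | ⟨z, t⟩⟩⟩ <;>
        first
          | exact absurd hms (mySplit_ne_nil _ _)
          | simp_all
    · have hsp : mySplit ',' (c :: rest) = prepHead [c] (mySplit ',' rest) := by
        simp [mySplit, hc]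
      refine ⟨?_, ?_, ?_⟩ <;>
        simp only [goB, if_neg hc, hsp] <;>
        rcases hms : mySplit ',' rest with _ | ⟨x, _ | ⟨y, _ | ⟨z, t⟩⟩⟩ <;>
        first
          | exact absurd hms (mySplit_ne_nil _ _)
          | (simp_all [prepHead]; try cases t <;> simp_all)

lemma goB_top (cs : List Char) :
    goB cs 0 [] [] [] = (match mySplit ',' cs with
      | [x, y, z] => some (x, y, z) | _ => none) := by
  have := (goB_spec cs [] [] []).1
  simpa using this

-- A's inner parse in terms of mySplit
lemma coreA (t : String) :
    pyParts3 (((PySem.Str.split? t ",").getD []).map PySem.Str.strip)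
      = (match mySplit ',' t.toList with
         | [x, y, z] => some (String.ofList (PySem.Chars.strip x),
                              String.ofList (PySem.Chars.strip y),
                              String.ofList (PySem.Chars.strip z))
         | _ => none) := by
  have hc : (",":String).toList = [','] := rfl
  have hsplit : ((PySem.Str.split? t ",").getD []) = (mySplit ',' t.toList).map String.ofList := by
    simp [PySem.Str.split?, hc, PySem.Chars.split?, splitOn_single]
  have hstrip : ∀ x : List Char, PySem.Str.strip (String.ofList x) = String.ofList (PySem.Chars.strip x) := by
    intro x
    apply String.toList_injective
    simp [PySem.Str.toList_strip]
  rw [hsplit]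
  rcases mySplit ',' t.toList with _ | ⟨x, _ | ⟨y, _ | ⟨z, _ | ⟨w, t'⟩⟩⟩⟩ <;>
    simp [pyParts3, hstrip]

-- the two outer guards agree
lemma guard_iff (cs : List Char) :
    (PySem.Chars.startswith cs ['('] && PySem.Chars.endswith cs [')']) = true
      ↔ ¬ (cs.length < 2 ∨ PySem.List.pyGet? cs 0 ≠ some '(' ∨ PySem.List.pyGet? cs (-1) ≠ some ')') := by
  rw [Bool.and_eq_true, PySem.Chars.startswith_iff, PySem.Chars.endswith_iff]
  constructor
  · rintro ⟨hp, hs⟩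
    rcases hp with ⟨p, rfl⟩
    rcases hs with ⟨q, hq⟩
    push_neg
    refine ⟨?_, ?_, ?_⟩
    · rcases p with _ | ⟨a, pt⟩
      · rcases q with _ | ⟨b, qt⟩ <;> simp_all
      · simp
    · simp
    · rw [PySem.List.pyGet?_neg_one, ← hq]
      simp
  · intro h
    push_neg at h
    obtain ⟨hl, h0, h1⟩ := h
    rw [PySem.List.pyGet?_zero] at h0
    rw [PySem.List.pyGet?_neg_one] at h1
    constructor
    · rcases cs with _ | ⟨a, t⟩
      · simp at h0
      · simp at h0
        subst h0
        exact ⟨t, rfl⟩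
    · rcases List.getLast?_eq_some_iff.mp h1 with ⟨q, hq⟩
      exact ⟨q, hq.symm⟩

-- ===== VERDICT (by name: the statement is the Claim_ definition above) =====
theorem parse_subpath_removed_py_spec : Claim_equal_parse_subpath_removed_py := by
  intro removed _
  unfold Spec_parse_subpath_removed_py
  simp only [parse_subpath_removed_py, parse_subpath_removed_py_alt]
  set s := PySem.Str.strip (if removed = "" then "" else removed) with hs
  have hsw : PySem.Str.startswith s "(" = PySem.Chars.startswith s.toList ['('] := by
    simp [PySem.Str.startswith_eq]
  have hew : PySem.Str.endswith s ")" = PySem.Chars.endswith s.toList [')'] := by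
    simp [PySem.Str.endswith_eq]
  by_cases hg : (PySem.Chars.startswith s.toList ['('] && PySem.Chars.endswith s.toList [')']) = true
  · have hg' := (guard_iff s.toList).mp hg
    rw [hsw, hew, hg]
    rw [if_neg hg']
    simp only [Bool.not_true, Bool.false_eq_true, if_false]
    rw [coreA, goB_top]
    have htl : (PySem.Str.slice s (some 1) (some (-1))).toList
        = PySem.List.slice s.toList (some 1) (some (-1)) := by
      simp [PySem.Str.toList_slice, PySem.Chars.slice_eq_listSlice]
    rw [htl]
    rcases mySplit ',' (PySem.List.slice s.toList (some 1) (some (-1))) with _ | ⟨x, _ | ⟨y, _ | ⟨z, _ | ⟨w, t'⟩⟩⟩⟩ <;> rfl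
  · have hg' : (s.toList.length < 2 ∨ PySem.List.pyGet? s.toList 0 ≠ some '(' ∨ PySem.List.pyGet? s.toList (-1) ≠ some ')') := by
      by_contra h
      exact hg ((guard_iff s.toList).mpr h)
    have hgf : (PySem.Chars.startswith s.toList ['('] && PySem.Chars.endswith s.toList [')']) = false := by
      simpa using hg
    rw [hsw, hew, hgf, if_pos hg']
    simp
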